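-- pv_equiv track=rewrite | github.com/bhed01/Data-Structures-and-Algorithms | Basic/fibonacci_partial_sum.py | find_repeating
-- ===== SOURCE A (Python) =====
-- def find_repeating(n):
--     """Finds repeating fibonacii numbers modulo n
--
--     Parameters
--     ----------
--     n : int
--
--     Returns
--     -------
--     (record, size, sum)
--         list    -> list of repeating numbers
--         size    -> count of repeating numbers
--         sum     -> sum of repeating numbers
--     """
--     record = [0, 1]
--     previous = 0
--     current = 1
--     sum = 1
--     size = 1
--     while True:
--         previous, current = current, (previous + current) % n
--         record.append(current)
--         if previous == 0 and current == 1: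
--             break
--         else:
--             size += 1
--             sum = (sum + current) % n
--     return record[:-2], size, sum
-- ===== SOURCE B (Python) =====
-- def find_repeating(n):
--     """Two-pass version: first find the Pisano period length by stepping the
--     (a, b) pair until it returns to (0, 1), storing nothing; then regenerate
--     exactly that many terms with a bounded for-loop and sum them."""
--     # Pass 1: period length only, no list.
--     a, b = 0, 1
--     length = 0
--     while True:
--         a, b = b, (a + b) % n
--         length += 1
--         if a == 0 and b == 1:
--             break
--     # Pass 2: regenerate the period.
--     seq = []
--     a, b = 0, 1
--     for _ in range(length):
--         seq.append(a)
--         a, b = b, (a + b) % n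
--     return seq, length, sum(seq) % n
-- ===== Notes on version B (the rewrite author's own statement) =====
-- stated objective: alternative
-- what changed: B is two-pass: pass 1 steps the (a,b) fibonacci-mod pair until it returns to (0,1), counting only the period length and storing no list; pass 2 regenerates exactly that many terms with a bounded for-loop, so A's growing record list, the [:-2] slice and the in-loop sum/size accumulators all disappear.
-- outside the precondition, e.g. on find_repeating(0): A raises ZeroDivisionError, B raises ZeroDivisionError
import Mathlib
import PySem

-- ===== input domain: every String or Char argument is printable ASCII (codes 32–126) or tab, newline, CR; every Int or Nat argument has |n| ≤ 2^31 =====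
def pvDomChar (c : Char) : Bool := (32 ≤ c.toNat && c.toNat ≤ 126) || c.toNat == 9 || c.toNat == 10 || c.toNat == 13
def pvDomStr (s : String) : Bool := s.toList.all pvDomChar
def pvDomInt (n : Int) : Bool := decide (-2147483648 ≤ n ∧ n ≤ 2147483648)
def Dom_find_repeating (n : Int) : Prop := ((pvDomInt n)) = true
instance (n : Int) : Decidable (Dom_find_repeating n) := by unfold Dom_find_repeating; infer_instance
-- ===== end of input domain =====

-- B is two-pass: pass 1 counts the Pisano period length storing no list; pass 2
-- regenerates exactly that many terms and sums them (objective: alternative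
-- decomposition, same cost). Both Pythons loop unboundedly; the ports totalise
-- the while-loops with the same fuel (the Pisano period of n is < 6*n) and
-- return a dummy ([],0,0) on exhaustion — unreached for n ≥ 2.

-- fuel shared by both ports: strictly more than the Pisano period of n for n ≥ 2
def pvFuel (n : Int) : Nat := 6 * n.toNat + 6

-- ===== PORT A =====
def findRepLoopA (n : Int) (fuel : Nat) (record : List Int)
    (previous current s size : Int) : List Int × Int × Int :=
  match fuel with
  | 0 => ([], 0, 0)
  | Nat.succ fuel =>
    -- previous, current = current, (previous + current) % n
    let p := current
    let c := PySem.Int.mod (previous + current) n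
    -- record.append(current)
    let rec' := record ++ [c]
    if p = 0 ∧ c = 1 then
      -- break; return record[:-2], size, sum
      (PySem.List.slice rec' none (some (-2)), size, s)
    else
      findRepLoopA n fuel rec' p c (PySem.Int.mod (s + c) n) (size + 1)

def find_repeating (n : Int) : List Int × Int × Int :=
  findRepLoopA n (pvFuel n) [0, 1] 0 1 1 1

-- ===== PORT B =====
-- pass 1: a, b = b, (a+b) % n; length += 1; break when (a, b) == (0, 1)
def lenLoopB (n : Int) (fuel : Nat) (a b : Int) (length : Nat) : Option Nat :=
  match fuel with
  | 0 => none
  | Nat.succ fuel =>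
    let a' := b
    let b' := PySem.Int.mod (a + b) n
    let length' := length + 1
    if a' = 0 ∧ b' = 1 then some length'
    else lenLoopB n fuel a' b' length'

-- pass 2: for _ in range(length): seq.append(a); a, b = b, (a+b) % n
def genLoopB (n : Int) (k : Nat) (seq : List Int) (a b : Int) : List Int :=
  match k with
  | 0 => seq
  | Nat.succ k => genLoopB n k (seq ++ [a]) b (PySem.Int.mod (a + b) n)

def find_repeating_alt (n : Int) : List Int × Int × Int :=
  match lenLoopB n (pvFuel n) 0 1 0 with
  | none => ([], 0, 0)
  | some L =>
    let seq := genLoopB n L [] 0 1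
    (seq, (L : Int), PySem.Int.mod (seq.foldl (· + ·) 0) n)

-- ===== PRECONDITION & SPEC =====
-- Pre_ excludes only inputs on which A never returns: n = 0 raises ZeroDivisionError,
-- and for every n ≤ 1 (including n = 1 and negatives) the pair (previous, current) can
-- never again equal (0, 1) modulo n, so the while-loop never breaks (A diverges).
def Pre_find_repeating (n : Int) : Prop := 2 ≤ n
instance (n : Int) : Decidable (Pre_find_repeating n) := by unfold Pre_find_repeating; infer_instance
def pvWitness_find_repeating : Int := 3

def Spec_find_repeating (n : Int) (out : List Int × Int × Int) : Prop := out = find_repeating_alt n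
instance (n : Int) (out : List Int × Int × Int) : Decidable (Spec_find_repeating n out) := by unfold Spec_find_repeating; infer_instance

-- ===== CLAIM (what is proved, stated in full; the proofs are below) =====
def Claim_equal_find_repeating : Prop := ∀ (n : Int), Dom_find_repeating n → Pre_find_repeating n → Spec_find_repeating n (find_repeating n)

-- ===== LEMMAS AND PROOFS =====

-- what B does with pass 1's result, generalised to an arbitrary resume point of pass 2
def pvPostB (n : Int) (o : Option Nat) (done : Nat) (seq : List Int) (a b : Int) :
    List Int × Int × Int :=
  match o with
  | none => ([], 0, 0)
  | some L =>
    let sq := genLoopB n (L - done) seq a b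
    (sq, (L : Int), PySem.Int.mod (sq.foldl (· + ·) 0) n)

theorem pvModAdd (n a b : Int) (hn : 0 < n) :
    PySem.Int.mod (PySem.Int.mod a n + b) n = PySem.Int.mod (a + b) n := by
  rw [PySem.Int.mod_eq_emod_of_pos hn, PySem.Int.mod_eq_emod_of_pos hn,
      PySem.Int.mod_eq_emod_of_pos hn]
  exact Int.emod_add_emod a n b

-- the slice record'[:-2] where record' = record ++ [c] and record ≠ []
theorem pvSliceAppend (record : List Int) (c : Int) (h : record ≠ []) :
    PySem.List.slice (record ++ [c]) none (some (-2)) = record.dropLast := by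
  rw [PySem.List.slice_to_neg_ofNat _ 2 (by omega)]
  have h1 : 1 ≤ record.length := List.length_pos_iff.mpr h
  have h2 : (record ++ [c]).length - 2 = record.length - 1 := by simp
  rw [h2, List.take_append_of_le_length (by omega), List.dropLast_eq_take]

-- pass 1's counter only goes up
theorem pvLenLoopGe (n : Int) (fuel : Nat) :
    ∀ (a b : Int) (len L : Nat), lenLoopB n fuel a b len = some L → len + 1 ≤ L := by
  induction fuel with
  | zero => intro a b len L h; simp [lenLoopB] at h
  | succ fuel ih =>
    intro a b len L h
    simp only [lenLoopB] at h
    split_ifs at h with hbr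
    · simp only [Option.some.injEq] at h; omega
    · have := ih _ _ _ _ h; omega

-- loop simulation: A's state (record = seq ++ [p, c], s, size) against B's pass 1
-- counter (= seq.length) with pass 2 resumed at (seq, p, c)
theorem pvLoopEq (n : Int) (hn : 2 ≤ n) (fuel : Nat) :
    ∀ (seq : List Int) (p c : Int),
      findRepLoopA n fuel (seq ++ [p, c]) p c
          (PySem.Int.mod (seq.foldl (· + ·) 0 + p + c) n) ((seq.length : Int) + 1)
        = pvPostB n (lenLoopB n fuel p c seq.length) seq.length seq p c := by
  induction fuel with
  | zero => intro seq p c; rfl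
  | succ fuel ih =>
    intro seq p c
    simp only [findRepLoopA, lenLoopB]
    by_cases hbr : c = 0 ∧ PySem.Int.mod (p + c) n = 1
    · rw [if_pos hbr, if_pos hbr]
      simp only [pvPostB]
      have hsl : PySem.List.slice ((seq ++ [p, c]) ++ [PySem.Int.mod (p + c) n]) none (some (-2))
          = seq ++ [p] := by
        rw [pvSliceAppend _ _ (by simp)]
        have : seq ++ [p, c] = (seq ++ [p]) ++ [c] := by simp
        rw [this, List.dropLast_concat]
      have hgen : genLoopB n (seq.length + 1 - seq.length) seq p c = seq ++ [p] := by
        have : seq.length + 1 - seq.length = 1 := by omega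
        rw [this]; rfl
      have hA : (seq ++ [p, c]) ++ [PySem.Int.mod (p + c) n]
          = seq ++ [p, c] ++ [PySem.Int.mod (p + c) n] := rfl
      rw [hsl, hgen]
      simp only [Prod.mk.injEq, true_and]
      constructor
      · push_cast; ring
      · rw [hbr.1, add_zero, List.foldl_append]
        simp
    · rw [if_neg hbr, if_neg hbr]
      have hrec : (seq ++ [p, c]) ++ [PySem.Int.mod (p + c) n]
          = (seq ++ [p]) ++ [c, PySem.Int.mod (p + c) n] := by simp
      have hs : PySem.Int.mod (PySem.Int.mod (seq.foldl (· + ·) 0 + p + c) n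
            + PySem.Int.mod (p + c) n) n
          = PySem.Int.mod ((seq ++ [p]).foldl (· + ·) 0 + c + PySem.Int.mod (p + c) n) n := by
        rw [pvModAdd _ _ _ (by omega), List.foldl_append]
        simp only [List.foldl_cons, List.foldl_nil]
      have hsize : (seq.length : Int) + 1 + 1 = ((seq ++ [p]).length : Int) + 1 := by
        push_cast [List.length_append, List.length_cons, List.length_nil]
        ring
      rw [hrec, hs, hsize, ih (seq ++ [p]) c (PySem.Int.mod (p + c) n)]
      have hlen : (seq ++ [p]).length = seq.length + 1 := by simp
      rw [hlen]
      -- relate the two pvPostB's: resume point moved one step forward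
      rcases h : lenLoopB n fuel c (PySem.Int.mod (p + c) n) (seq.length + 1) with _ | L
      · rfl
      · have hL : seq.length + 2 ≤ L := pvLenLoopGe n fuel _ _ _ _ h
        simp only [pvPostB]
        have hk : L - seq.length = (L - (seq.length + 1)) + 1 := by omega
        rw [hk]
        rfl

-- ===== VERDICT (by name: the statement is the Claim_ definition above) =====
theorem find_repeating_spec : Claim_equal_find_repeating := by
  intro n _ hpre
  have hn : 2 ≤ n := hpre
  show find_repeating n = find_repeating_alt n
  have h := pvLoopEq n hn (pvFuel n) [] 0 1
  have h1 : PySem.Int.mod ((([] : List Int).foldl (· + ·) 0) + 0 + 1) n = 1 := by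
    simp only [List.foldl_nil, zero_add]
    rw [PySem.Int.mod_eq_emod_of_pos (by omega : (0:Int) < n)]
    exact Int.emod_eq_of_lt (by omega) (by omega)
  rw [h1] at h
  simp only [List.nil_append, List.length_nil, Nat.cast_zero, zero_add] at h
  have h2 : find_repeating n = pvPostB n (lenLoopB n (pvFuel n) 0 1 0) 0 [] 0 1 := h
  rw [h2]
  unfold find_repeating_alt pvPostB
  rcases lenLoopB n (pvFuel n) 0 1 0 with _ | L
  · rfl
  · simp
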